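-- pv_equiv track=rewrite | github.com/Sizuni/AdventOfCodeBrothers2022 | Python/challenges/day_3.py | get_common_item
-- ===== SOURCE A (Python) =====
-- def get_common_item(comps: list):
--     comp1 = comps.pop()
--     for i in range(len(comp1)):
--         item_found_in_all = True
--         for comp in comps:
--             if comp1[i] not in comp:
--                 item_found_in_all = False
--         if item_found_in_all:
--             return comp1[i]
-- ===== SOURCE B (Python) =====
-- def get_common_item(comps: list):
--     comp1 = comps.pop()
--     common = set(comp1)
--     for comp in comps:
--         common &= set(comp)
--     for ch in comp1:
--         if ch in common:
--             return ch
--     return None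
-- ===== Notes on version B (the rewrite author's own statement) =====
-- stated objective: simpler
-- what changed: Replaces the nested per-character scan over all compartments by a single precomputed intersection set followed by one ordered pass over the popped compartment.
-- outside the precondition, e.g. on get_common_item([]): A raises IndexError, B raises IndexError
import Mathlib
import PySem

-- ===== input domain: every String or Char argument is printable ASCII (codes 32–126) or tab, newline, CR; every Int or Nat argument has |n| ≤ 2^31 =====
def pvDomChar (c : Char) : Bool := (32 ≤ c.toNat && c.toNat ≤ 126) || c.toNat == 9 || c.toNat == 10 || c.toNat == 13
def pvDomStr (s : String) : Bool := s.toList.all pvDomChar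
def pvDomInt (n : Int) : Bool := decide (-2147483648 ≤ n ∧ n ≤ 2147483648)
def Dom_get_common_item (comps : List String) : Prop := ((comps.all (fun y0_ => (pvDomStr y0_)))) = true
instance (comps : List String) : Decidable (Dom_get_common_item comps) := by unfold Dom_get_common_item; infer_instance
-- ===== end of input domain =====

-- B replaces A's nested per-character scans by one precomputed intersection set plus a single
-- ordered pass (objective: simpler). Both pop the last element of comps; equivalence is about
-- the RETURN value (the mutation is identical).

-- ===== PORT A =====
-- inner loop: for comp in comps: if comp1[i] not in comp: item_found_in_all = False
-- ('ch in comp' on a single character is exactly character membership)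
def pvAInner (rest : List String) (ch : Char) : Bool :=
  rest.foldl (fun acc comp => if comp.toList.contains ch then acc else false) true

-- outer loop over the characters of comp1 (range(len(comp1)) with comp1[i])
def pvALoop (rest : List String) : List Char → Option String
  | [] => none
  | ch :: cs => if pvAInner rest ch then some (String.ofList [ch]) else pvALoop rest cs

def get_common_item (comps : List String) : Option String :=
  match PySem.List.pop? comps (-1) with
  | none => none   -- comps = []: Python raises IndexError; excluded by Pre_
  | some (comp1, rest) => pvALoop rest comp1.toList

-- ===== PORT B =====
def get_common_item_alt (comps : List String) : Option String :=
  match PySem.List.pop? comps (-1) with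
  | none => none   -- comps = []: Source B's pop raises too; excluded by Pre_
  | some (comp1, rest) =>
    let common := rest.foldl
      (fun s comp => PySem.Set.inter s (PySem.Set.ofList comp.toList))
      (PySem.Set.ofList comp1.toList)
    (comp1.toList.find? (fun ch => PySem.Set.contains common ch)).map
      (fun ch => String.ofList [ch])

-- ===== PRECONDITION & SPEC =====
-- Pre_ excludes only comps = [], on which both Pythons raise IndexError from pop().
def Pre_get_common_item (comps : List String) : Prop := comps ≠ []
instance (comps : List String) : Decidable (Pre_get_common_item comps) := by
  unfold Pre_get_common_item; infer_instance

def pvWitness_get_common_item : List String := ["ab", "bc"]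

def Spec_get_common_item (comps : List String) (out : Option String) : Prop := out = get_common_item_alt comps
instance (comps : List String) (out : Option String) : Decidable (Spec_get_common_item comps out) := by unfold Spec_get_common_item; infer_instance

-- ===== CLAIM (what is proved, stated in full; the proofs are below) =====
def Claim_equal_get_common_item : Prop := ∀ (comps : List String), Dom_get_common_item comps → Pre_get_common_item comps → Spec_get_common_item comps (get_common_item comps)

-- ===== LEMMAS AND PROOFS =====

-- A's inner Bool-accumulator loop is the 'all' predicate
theorem pvAInner_eq_all (rest : List String) (ch : Char) :
    pvAInner rest ch = rest.all (fun comp => comp.toList.contains ch) := by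
  have key : ∀ (l : List String) (acc : Bool),
      l.foldl (fun a comp => if comp.toList.contains ch then a else false) acc
        = (acc && l.all (fun comp => comp.toList.contains ch)) := by
    intro l
    induction l with
    | nil => simp
    | cons c cs ih =>
      intro acc
      rw [List.foldl_cons, ih]
      cases hc : c.toList.contains ch <;>
        simp only [List.all_cons, hc, Bool.false_eq_true, if_false, if_true,
          Bool.false_and, Bool.and_false, Bool.true_and]
  simpa [pvAInner] using key rest true

-- membership in the folded intersection
theorem mem_common (rest : List String) (s : PySem.Set Char) (ch : Char) :
    PySem.Set.contains
        (rest.foldl (fun s comp => PySem.Set.inter s (PySem.Set.ofList comp.toList)) s) ch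
      = (PySem.Set.contains s ch && rest.all (fun comp => comp.toList.contains ch)) := by
  induction rest generalizing s with
  | nil => simp
  | cons c cs ih =>
    rw [List.foldl_cons, ih]
    simp only [List.all_cons, PySem.Set.contains_eq_listContains, List.contains_eq_mem,
      PySem.Set.mem_inter, PySem.Set.mem_ofList, Bool.decide_and]
    cases hd : decide (ch ∈ s) <;> simp

-- A's outer loop is find? against the intersection, on any suffix of comp1's characters
theorem pvALoop_eq_find (rest : List String) (full : List Char) (cs : List Char)
    (h : ∀ ch ∈ cs, ch ∈ full) :
    pvALoop rest cs
      = (cs.find? (fun ch => PySem.Set.contains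
            (rest.foldl (fun s comp => PySem.Set.inter s (PySem.Set.ofList comp.toList))
              (PySem.Set.ofList full)) ch)).map (fun ch => String.ofList [ch]) := by
  induction cs with
  | nil => rfl
  | cons ch cs ih =>
    have hch : ch ∈ full := h ch (List.mem_cons_self ..)
    have hcond : PySem.Set.contains
        (rest.foldl (fun s comp => PySem.Set.inter s (PySem.Set.ofList comp.toList))
          (PySem.Set.ofList full)) ch
        = rest.all (fun comp => comp.toList.contains ch) := by
      rw [mem_common]
      simp only [PySem.Set.contains_eq_listContains, List.contains_eq_mem,
        PySem.Set.mem_ofList, hch, decide_true, Bool.true_and]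
    rw [List.find?_cons]
    cases hall : rest.all (fun comp => comp.toList.contains ch) with
    | true =>
      simp only [pvALoop, pvAInner_eq_all, hcond, hall, if_true]
      rfl
    | false =>
      simp only [pvALoop, pvAInner_eq_all, hcond, hall, Bool.false_eq_true, if_false]
      exact ih (fun x hx => h x (List.mem_cons_of_mem _ hx))

-- ===== VERDICT (by name: the statement is the Claim_ definition above) =====
theorem get_common_item_spec : Claim_equal_get_common_item := by
  intro comps _ hpre
  unfold Spec_get_common_item get_common_item get_common_item_alt
  cases hp : PySem.List.pop? comps (-1) with
  | none => rfl
  | some r =>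
    obtain ⟨comp1, rest⟩ := r
    exact pvALoop_eq_find rest comp1.toList comp1.toList (fun _ h => h)
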